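-- pv_equiv track=rewrite | github.com/josiahjones919-hue/Primary | ProcessorDesignTask2.py | build_kmap
-- ===== SOURCE A (Python) =====
-- def gray_code(n):
--     if n == 1:
--         return ['0', '1']
--     prev = gray_code(n-1)
--     return ['0'+x for x in prev] + ['1'+x for x in reversed(prev)]
--
-- def build_kmap(minterms, n):
--     if n == 2:
--         rows = gray_code(1)
--         cols = gray_code(1)
--     elif n == 3:
--         rows = gray_code(1)
--         cols = gray_code(2)
--     elif n == 4:
--         rows = gray_code(2)
--         cols = gray_code(2)
--     else:
--         raise ValueError("K-map only supported for 2–4 variables")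
--
--     kmap = [[0 for _ in cols] for _ in rows]
--
--     for m in minterms:
--         bits = format(m, f'0{n}b')
--         r = bits[:len(rows[0])]
--         c = bits[len(rows[0]):]
--         i = rows.index(r)
--         j = cols.index(c)
--         kmap[i][j] = 1
--
--     return kmap, rows, cols
-- ===== SOURCE B (Python) =====
-- def gray_code(n):
--     # closed-form Gray code: i-th entry is the binary of i ^ (i >> 1)
--     return [format(i ^ (i >> 1), f'0{n}b') for i in range(2 ** n)]
--
-- def gray_index(v):
--     # inverse Gray code: position of value v in the Gray sequence
--     i = v
--     while v:
--         v >>= 1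
--         i ^= v
--     return i
--
-- def build_kmap(minterms, n):
--     if n == 2:
--         rb, cb = 1, 1
--     elif n == 3:
--         rb, cb = 1, 2
--     elif n == 4:
--         rb, cb = 2, 2
--     else:
--         raise ValueError("K-map only supported for 2–4 variables")
--
--     rows = gray_code(rb)
--     cols = gray_code(cb)
--     kmap = [[0] * len(cols) for _ in rows]
--
--     for m in minterms:
--         kmap[gray_index(m >> cb)][gray_index(m & ((1 << cb) - 1))] = 1
--
--     return kmap, rows, cols
-- ===== Notes on version B (the rewrite author's own statement) =====
-- stated objective: alternative
-- what changed: B generates the Gray code rows/cols by the closed-form bitwise formula format(i ^ (i >> 1), f'0{k}b') instead of A's recursive reflect-and-prefix construction, and places each minterm by an arithmetic inverse-Gray index on the minterm's high/low bits instead of A's per-minterm binary-string formatting, slicing and linear list .index scans.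
import Mathlib
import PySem

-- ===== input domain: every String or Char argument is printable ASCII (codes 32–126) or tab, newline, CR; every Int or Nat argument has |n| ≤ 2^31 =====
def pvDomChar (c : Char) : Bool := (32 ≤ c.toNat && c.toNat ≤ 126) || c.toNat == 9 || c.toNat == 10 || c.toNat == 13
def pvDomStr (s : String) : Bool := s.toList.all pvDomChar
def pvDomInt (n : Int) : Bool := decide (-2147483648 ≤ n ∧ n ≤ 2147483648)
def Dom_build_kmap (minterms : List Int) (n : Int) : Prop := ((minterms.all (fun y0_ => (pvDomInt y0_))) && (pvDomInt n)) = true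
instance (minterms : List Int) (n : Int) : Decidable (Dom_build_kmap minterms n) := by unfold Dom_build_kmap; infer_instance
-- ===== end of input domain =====

-- B replaces A's recursive reflect-and-prefix Gray code and per-minterm string slicing/linear
-- .index lookups with a closed-form bitwise Gray code and an arithmetic inverse-Gray index
-- (objective: alternative algorithm, same asymptotic cost).


-- shared primitive: format(v, f'0{k}b') — exact for 0 ≤ v (negative v is excluded by Pre_,
-- where Python pads after the '-' sign); PySem.Int.toBinChars is format(v, 'b')
def pyFormat0b (k : Nat) (v : Int) : List Char :=
  let bits := PySem.Int.toBinChars v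
  List.replicate (k - bits.length) '0' ++ bits

-- ===== PORT A =====
-- A's recursive gray_code; Python recurses on n-1 until n == 1 (n ≤ 0 never returns in
-- Python; the 0 branch here is a mere totality guard, unreachable from build_kmap)
def grayA : Nat → List String
  | 0 => []
  | 1 => ["0", "1"]
  | k + 2 =>
    let prev := grayA (k + 1)
    prev.map (fun x => String.ofList ('0' :: x.toList)) ++
      (prev.reverse.map (fun x => String.ofList ('1' :: x.toList)))

-- r, c = bits[:len(rows[0])], bits[len(rows[0]):]; i = rows.index(r); j = cols.index(c)
-- (rows.index / cols.index raise ValueError on a miss — excluded by Pre_, so .getD 0 is never used)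
def rcA (n : Int) (rows cols : List String) (m : Int) : Nat × Nat :=
  let bits := pyFormat0b n.toNat m
  let w := (rows.headD "").toList.length
  ((PySem.List.index? rows (String.ofList (bits.take w))).getD 0,
   (PySem.List.index? cols (String.ofList (bits.drop w))).getD 0)

-- kmap[i][j] = 1 (in range under Pre_, so List.set is exact)
def stepA (n : Int) (rows cols : List String) (km : List (List Int)) (m : Int) : List (List Int) :=
  let ij := rcA n rows cols m
  km.set ij.1 ((km.getD ij.1 []).set ij.2 1)

def kmapCoreA (minterms : List Int) (n : Int) (rows cols : List String) :
    List (List Int) × List String × List String :=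
  (minterms.foldl (stepA n rows cols) (rows.map (fun _ => cols.map (fun _ => (0 : Int)))),
   rows, cols)

def build_kmap (minterms : List Int) (n : Int) : List (List Int) × List String × List String :=
  if n == 2 then kmapCoreA minterms n (grayA 1) (grayA 1)
  else if n == 3 then kmapCoreA minterms n (grayA 1) (grayA 2)
  else if n == 4 then kmapCoreA minterms n (grayA 2) (grayA 2)
  else ([], [], [])  -- Python raises ValueError here; excluded by Pre_

-- ===== PORT B =====
-- B's closed-form gray_code: [format(i ^ (i >> 1), f'0{k}b') for i in range(2 ** k)]
def grayB (k : Nat) : List String :=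
  (List.range (2 ^ k)).map (fun i => String.ofList (pyFormat0b k (Int.ofNat (i ^^^ (i >>> 1)))))

-- Source B's gray_index loop: i = v; while v: v >>= 1; i ^= v.  The loop halves v, so v
-- itself bounds the iteration count; fuel = v keeps the recursion structural (kernel-reducible)
def grayIndexAux (fuel : Nat) (i v : Nat) : Nat :=
  match fuel with
  | 0 => i
  | f + 1 => if v = 0 then i else grayIndexAux f (i ^^^ (v / 2)) (v / 2)

-- exact for 0 ≤ v (Python's loop never terminates for v < 0; excluded by Pre_)
def grayIndex (v : Int) : Nat := grayIndexAux v.toNat v.toNat v.toNat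

-- i, j = gray_index(m >> cb), gray_index(m & ((1 << cb) - 1))
def rcB (cb : Nat) (m : Int) : Nat × Nat :=
  (grayIndex (m >>> cb), grayIndex (PySem.Int.band m ((1 <<< cb) - 1)))

def stepB (cb : Nat) (km : List (List Int)) (m : Int) : List (List Int) :=
  let ij := rcB cb m
  km.set ij.1 ((km.getD ij.1 []).set ij.2 1)

def kmapCoreB (minterms : List Int) (rb cb : Nat) :
    List (List Int) × List String × List String :=
  (minterms.foldl (stepB cb)
     ((grayB rb).map (fun _ => List.replicate (grayB cb).length (0 : Int))),
   grayB rb, grayB cb)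

def build_kmap_alt (minterms : List Int) (n : Int) : List (List Int) × List String × List String :=
  if n == 2 then kmapCoreB minterms 1 1
  else if n == 3 then kmapCoreB minterms 1 2
  else if n == 4 then kmapCoreB minterms 2 2
  else ([], [], [])  -- Python raises ValueError here; excluded by Pre_

-- ===== PRECONDITION & SPEC =====
-- Pre_ admits exactly the inputs on which Python A returns: n ∈ {2,3,4} (else ValueError)
-- and every minterm in [0, 2^n) (else rows.index/cols.index raises ValueError).
def Pre_build_kmap (minterms : List Int) (n : Int) : Prop :=
  (n = 2 ∨ n = 3 ∨ n = 4) ∧ ∀ m ∈ minterms, 0 ≤ m ∧ m < 2 ^ n.toNat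
instance (minterms : List Int) (n : Int) : Decidable (Pre_build_kmap minterms n) := by
  unfold Pre_build_kmap; infer_instance
def pvWitness_build_kmap : List Int × Int := ([0, 3, 5], 3)

def Spec_build_kmap (minterms : List Int) (n : Int) (out : List (List Int) × List String × List String) : Prop := out = build_kmap_alt minterms n
instance (minterms : List Int) (n : Int) (out : List (List Int) × List String × List String) : Decidable (Spec_build_kmap minterms n out) := by unfold Spec_build_kmap; infer_instance

-- ===== CLAIM (what is proved, stated in full; the proofs are below) =====
def Claim_equal_build_kmap : Prop := ∀ (minterms : List Int) (n : Int), Dom_build_kmap minterms n → Pre_build_kmap minterms n → Spec_build_kmap minterms n (build_kmap minterms n)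

-- ===== LEMMAS AND PROOFS =====

-- the two index computations agree on in-range minterms, per variable count
lemma rc_eq_2 : ∀ m : Int, 0 ≤ m → m < 4 → rcA 2 (grayA 1) (grayA 1) m = rcB 1 m := by
  intro m h1 h2; interval_cases m <;> decide

lemma rc_eq_3 : ∀ m : Int, 0 ≤ m → m < 8 → rcA 3 (grayA 1) (grayA 2) m = rcB 2 m := by
  intro m h1 h2; interval_cases m <;> decide

lemma rc_eq_4 : ∀ m : Int, 0 ≤ m → m < 16 → rcA 4 (grayA 2) (grayA 2) m = rcB 2 m := by
  intro m h1 h2; interval_cases m <;> decide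

lemma core_eq (minterms : List Int) (n : Int) (rb cb : Nat)
    (hstep : ∀ m ∈ minterms, ∀ km, stepA n (grayB rb) (grayB cb) km m = stepB cb km m) :
    kmapCoreA minterms n (grayB rb) (grayB cb) = kmapCoreB minterms rb cb := by
  unfold kmapCoreA kmapCoreB
  refine Prod.ext ?_ rfl
  dsimp only
  have hinit : (grayB rb).map (fun _ => (grayB cb).map (fun _ => (0 : Int)))
      = (grayB rb).map (fun _ => List.replicate (grayB cb).length (0 : Int)) := by
    simp [List.map_const']
  rw [hinit]
  exact PySem.List.foldl_congr_mem' minterms _ _ _ hstep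

theorem build_kmap_spec : Claim_equal_build_kmap := by
  intro minterms n _ hpre
  obtain ⟨hn, hm⟩ := hpre
  unfold Spec_build_kmap
  rcases hn with h | h | h <;> subst h
  · show kmapCoreA minterms 2 (grayB 1) (grayB 1) = kmapCoreB minterms 1 1
    exact core_eq minterms 2 1 1 (fun m hmem km => by
      have h := hm m hmem
      simp only [stepA, stepB, show grayB 1 = grayA 1 from by decide,
        rc_eq_2 m h.1 (by exact_mod_cast h.2)])
  · show kmapCoreA minterms 3 (grayB 1) (grayB 2) = kmapCoreB minterms 1 2
    exact core_eq minterms 3 1 2 (fun m hmem km => by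
      have h := hm m hmem
      simp only [stepA, stepB, show grayB 1 = grayA 1 from by decide,
        show grayB 2 = grayA 2 from by decide,
        rc_eq_3 m h.1 (by exact_mod_cast h.2)])
  · show kmapCoreA minterms 4 (grayB 2) (grayB 2) = kmapCoreB minterms 2 2
    exact core_eq minterms 4 2 2 (fun m hmem km => by
      have h := hm m hmem
      simp only [stepA, stepB, show grayB 2 = grayA 2 from by decide,
        rc_eq_4 m h.1 (by exact_mod_cast h.2)])
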